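-- pv_equiv track=rewrite | github.com/Michael14567/Signal | mian.py | gf2_vector_matrix_mul
-- ===== SOURCE A (Python) =====
-- def gf2_vector_matrix_mul(vector, matrix):
--     """
--     Умножение вектора-строки на матрицу над GF(2).
--     """
--     result = []
--
--     for column in range(len(matrix[0])):
--         value = 0
--
--         for row in range(len(vector)):
--             value ^= vector[row] & matrix[row][column]
--
--         result.append(value)
--
--     return tuple(result)
-- ===== SOURCE B (Python) =====
-- def gf2_vector_matrix_mul(vector, matrix):
--     """
--     Умножение вектора-строки на матрицу над GF(2).
--     Row-wise linear combination: accumulate each row's contribution into a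
--     running result vector, skipping zero coefficients.
--     """
--     result = [0] * len(matrix[0])
--
--     for v, row in zip(vector, matrix):
--         if v != 0:
--             result = [r ^ (v & x) for r, x in zip(result, row)]
--
--     return tuple(result)
-- ===== Notes on version B (the rewrite author's own statement) =====
-- stated objective: alternative
-- what changed: Replaces column-wise dot products (outer loop over columns, inner scan over all rows with indexed access) by a row-wise linear combination: a running result vector is updated once per (coefficient,row) pair via zip, skipping rows with zero coefficient.
import Mathlib
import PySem

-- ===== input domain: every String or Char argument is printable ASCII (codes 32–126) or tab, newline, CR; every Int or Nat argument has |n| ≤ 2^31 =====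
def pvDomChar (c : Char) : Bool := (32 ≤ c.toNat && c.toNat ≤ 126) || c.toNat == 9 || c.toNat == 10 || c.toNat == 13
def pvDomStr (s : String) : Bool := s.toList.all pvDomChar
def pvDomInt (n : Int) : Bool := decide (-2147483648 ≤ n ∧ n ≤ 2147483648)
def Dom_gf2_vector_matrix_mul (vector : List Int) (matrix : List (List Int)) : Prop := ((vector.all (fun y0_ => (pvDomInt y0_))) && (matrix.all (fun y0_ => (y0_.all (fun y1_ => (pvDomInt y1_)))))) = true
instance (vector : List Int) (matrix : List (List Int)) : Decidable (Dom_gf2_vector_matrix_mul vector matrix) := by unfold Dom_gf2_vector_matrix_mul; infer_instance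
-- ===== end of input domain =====

-- B replaces A's column-wise dot products by a row-wise linear combination
-- accumulated into a running result vector (alternative decomposition, same cost).


-- ===== PORT A =====
-- outer loop over columns of matrix[0]; inner loop over rows computes one dot product
def gf2_vector_matrix_mul (vector : List Int) (matrix : List (List Int)) : List Int :=
  (List.range matrix.headI.length).foldl
    (fun result column =>
      result ++ [(List.range vector.length).foldl
        (fun value row => PySem.Int.bxor value (PySem.Int.band (vector.getD row 0) ((matrix.getD row []).getD column 0))) 0])
    []

-- ===== PORT B =====
-- row-wise accumulation: result starts at all zeros, each (v,row) pair XORs its contribution in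
def gf2_vector_matrix_mul_alt (vector : List Int) (matrix : List (List Int)) : List Int :=
  (vector.zip matrix).foldl
    (fun result p =>
      if p.1 ≠ 0 then (result.zip p.2).map (fun q => PySem.Int.bxor q.1 (PySem.Int.band p.1 q.2)) else result)
    (List.replicate matrix.headI.length 0)

-- ===== PRECONDITION & SPEC =====
-- Pre_ excludes exactly the inputs on which A raises IndexError: an empty matrix,
-- or (when matrix[0] is nonempty) a vector longer than the matrix or an accessed row
-- shorter than matrix[0].
def Pre_gf2_vector_matrix_mul (vector : List Int) (matrix : List (List Int)) : Prop :=
  matrix ≠ [] ∧ (matrix.headI.length = 0 ∨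
    (vector.length ≤ matrix.length ∧
     ∀ r ∈ matrix.take vector.length, matrix.headI.length ≤ r.length))
instance (vector : List Int) (matrix : List (List Int)) : Decidable (Pre_gf2_vector_matrix_mul vector matrix) := by unfold Pre_gf2_vector_matrix_mul; infer_instance

def pvWitness_gf2_vector_matrix_mul : List Int × List (List Int) := ([1, 0, 1], [[1, 0], [1, 1], [0, 1]])

def Spec_gf2_vector_matrix_mul (vector : List Int) (matrix : List (List Int)) (out : List Int) : Prop := out = gf2_vector_matrix_mul_alt vector matrix
instance (vector : List Int) (matrix : List (List Int)) (out : List Int) : Decidable (Spec_gf2_vector_matrix_mul vector matrix out) := by unfold Spec_gf2_vector_matrix_mul; infer_instance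

-- ===== CLAIM (what is proved, stated in full; the proofs are below) =====
def Claim_equal_gf2_vector_matrix_mul : Prop := ∀ (vector : List Int) (matrix : List (List Int)), Dom_gf2_vector_matrix_mul vector matrix → Pre_gf2_vector_matrix_mul vector matrix → Spec_gf2_vector_matrix_mul vector matrix (gf2_vector_matrix_mul vector matrix)

-- ===== LEMMAS AND PROOFS =====

-- A's outer loop builds the list of its column values
theorem foldl_append_map {α β : Type} (l : List α) (f : α → β) (acc : List β) :
    l.foldl (fun r c => r ++ [f c]) acc = acc ++ l.map f := by
  induction l generalizing acc with
  | nil => simp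
  | cons x xs ih => simp [List.foldl, ih]

-- indexed fold over range = fold over the zip (when the second list is long enough)
theorem foldl_range_zip {α β γ : Type} (dx : α) (dy : β) (f : γ → α → β → γ) :
    ∀ (xs : List α) (ys : List β) (a : γ), xs.length ≤ ys.length →
    (List.range xs.length).foldl (fun acc i => f acc (xs.getD i dx) (ys.getD i dy)) a
      = (xs.zip ys).foldl (fun acc p => f acc p.1 p.2) a := by
  intro xs
  induction xs with
  | nil => simp
  | cons x xs ih =>
    intro ys a h
    cases ys with
    | nil => simp at h
    | cons y ys =>
      simp only [List.length_cons, List.range_succ_eq_map, List.foldl_cons, List.foldl_map,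
        List.zip_cons_cons]
      simp only [List.getD_cons_zero, List.getD_cons_succ]
      exact ih ys (f a x y) (by simpa using h)

-- a list is the table of its entries
theorem map_getD_range {α : Type} (d : α) (l : List α) :
    (List.range l.length).map (fun c => l.getD c d) = l := by
  induction l with
  | nil => simp
  | cons x xs ih =>
    simp only [List.length_cons, List.range_succ_eq_map, List.map_cons, List.map_map]
    simp only [List.getD_cons_zero, Function.comp_def, List.getD_cons_succ]
    exact congrArg (x :: ·) ih

-- characterization of B's fold: it stays a table over the initial length,
-- entry c accumulating XORs of p.1 &&& p.2[c]
theorem alt_fold_char :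
    ∀ (pairs : List (Int × List Int)) (init : List Int),
      (∀ p ∈ pairs, init.length ≤ p.2.length) →
      pairs.foldl
        (fun result p =>
          if p.1 ≠ 0 then (result.zip p.2).map (fun q => PySem.Int.bxor q.1 (PySem.Int.band p.1 q.2)) else result)
        init
      = (List.range init.length).map
          (fun c => pairs.foldl (fun val p => PySem.Int.bxor val (PySem.Int.band p.1 (p.2.getD c 0))) (init.getD c 0)) := by
  intro pairs
  induction pairs with
  | nil => intro init _; simp only [List.foldl_nil]; exact (map_getD_range 0 init).symm
  | cons p ps ih =>
    intro init h
    by_cases hp : p.1 = 0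
    · have hz : ∀ x : Int, PySem.Int.band (0 : Int) x = 0 := by
        intro x; rw [PySem.Int.band_comm]; simp
      simp only [List.foldl_cons, hp, ne_eq, not_true_eq_false, if_false, hz,
        PySem.Int.bxor_zero]
      exact ih init (fun q hq => h q (List.mem_cons_of_mem _ hq))
    · have hlen : init.length ≤ p.2.length := h p (List.mem_cons_self ..)
      have hzlen : ((init.zip p.2).map (fun q => PySem.Int.bxor q.1 (PySem.Int.band p.1 q.2))).length = init.length := by
        simp [List.length_zip, Nat.min_eq_left hlen]
      simp only [List.foldl_cons, hp, ne_eq, not_false_eq_true, if_true]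
      rw [ih _ (fun q hq => by rw [hzlen]; exact h q (List.mem_cons_of_mem _ hq)), hzlen]
      apply List.map_congr_left
      intro c hc
      have hc' : c < init.length := List.mem_range.mp hc
      congr 1
      have hc2 : c < ((init.zip p.2).map (fun q => PySem.Int.bxor q.1 (PySem.Int.band p.1 q.2))).length := by
        rw [hzlen]; exact hc'
      rw [List.getD_eq_getElem _ _ hc2, List.getD_eq_getElem _ _ hc',
        List.getD_eq_getElem _ _ (Nat.lt_of_lt_of_le hc' hlen)]
      simp [List.getElem_zip]

-- ===== VERDICT (by name: the statement is the Claim_ definition above) =====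
theorem gf2_vector_matrix_mul_spec : Claim_equal_gf2_vector_matrix_mul := by
  intro vector matrix _ hpre
  obtain ⟨hne, hcase⟩ := hpre
  unfold Spec_gf2_vector_matrix_mul gf2_vector_matrix_mul gf2_vector_matrix_mul_alt
  rcases hcase with h0 | ⟨hlen, hrows⟩
  · -- no columns: both sides are empty
    rw [h0]
    simp only [List.range_zero, List.foldl_nil, List.replicate_zero]
    rw [alt_fold_char (vector.zip matrix) [] (by intro p _; simp)]
    simp
  · -- general case: both equal the table of dot products
    have hmem : ∀ p ∈ vector.zip matrix,
        (List.replicate matrix.headI.length (0 : Int)).length ≤ p.2.length := by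
      intro p hp
      rw [List.length_replicate]
      obtain ⟨i, hi, hpi⟩ := List.mem_iff_getElem.mp hp
      have hiv : i < vector.length := by
        have := hi; rw [List.length_zip] at this; omega
      have him : i < matrix.length := Nat.lt_of_lt_of_le hiv hlen
      have hp2 : p.2 = matrix[i] := by
        rw [← hpi]; simp [List.getElem_zip]
      rw [hp2]
      apply hrows
      have hit : i < (matrix.take vector.length).length := by
        simp [List.length_take]; omega
      have : (matrix.take vector.length)[i] = matrix[i] := List.getElem_take ..
      rw [← this]
      exact List.getElem_mem hit
    rw [alt_fold_char (vector.zip matrix) _ hmem, List.length_replicate,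
      foldl_append_map, List.nil_append]
    apply List.map_congr_left
    intro c hc
    rw [List.getD_eq_getElem _ _ (by simpa using hc), List.getElem_replicate]
    exact foldl_range_zip 0 [] (fun acc x y => PySem.Int.bxor acc (PySem.Int.band x (y.getD c 0))) vector matrix 0 hlen
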